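-- pv_equiv track=rewrite | github.com/RROMSIL/KickStart-Google-Competition | kickStartAlarm.py | solve
-- ===== SOURCE A (Python) =====
-- def solve(values, i):
--     ''' (list of int) --> int
--
--     Result is just the summation of the i exponential-power
--     of all the contiguous subarrays of the Parameter Array.
--
--     >>> result([1,4,2],2)
--     >>> 71
--
--     '''
--     result = 0
--     occurrence = 0
--     index = 0
--     module = 1000000007
--
--
--     for k in range (len(values)):
--         index = index + 1
--         for j in range (k, len(values)):
--             semiResult = (values[j] * index**i) % module
--             occurrence = len(values) - j
--             result =  ((semiResult * occurrence) + result) % module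
--
--
--     return result
-- ===== SOURCE B (Python) =====
-- def solve(values, i):
--     """Single pass using a running prefix sum of (k+1)**i mod p (O(n) modular
--     exponentiations instead of A's O(n^2) inner loop)."""
--     p = 1000000007
--     n = len(values)
--     total = 0
--     prefix = 0
--     for j, v in enumerate(values):
--         prefix = (prefix + pow(j + 1, i, p)) % p
--         total = (total + v * (n - j) * prefix) % p
--     return total
-- ===== Notes on version B (the rewrite author's own statement) =====
-- stated objective: faster
-- what changed: Replaces A's O(n^2) double loop by a single pass that maintains a running prefix sum of (k+1)^i mod p and weights each value once by (n-j), using modular exponentiation pow(j+1, i, p) instead of full-size integer powers.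
-- outside the precondition, e.g. on solve([0, 1], -1): A returns 1.5, B returns 500000005
import Mathlib
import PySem

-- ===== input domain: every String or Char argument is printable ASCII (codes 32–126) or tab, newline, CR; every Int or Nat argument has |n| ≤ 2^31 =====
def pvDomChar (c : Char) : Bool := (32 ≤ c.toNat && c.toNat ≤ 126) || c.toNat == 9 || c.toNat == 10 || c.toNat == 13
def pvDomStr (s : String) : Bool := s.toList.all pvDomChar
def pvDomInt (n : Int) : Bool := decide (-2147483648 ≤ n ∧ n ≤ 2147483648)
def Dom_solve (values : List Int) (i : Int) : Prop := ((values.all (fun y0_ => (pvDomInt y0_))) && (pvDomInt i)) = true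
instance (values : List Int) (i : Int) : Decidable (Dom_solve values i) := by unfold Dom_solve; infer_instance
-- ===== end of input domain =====

-- B replaces A's quadratic double loop by one pass with a running prefix sum of (k+1)^i mod p (objective: faster).

-- ===== PORT A =====
def solve (values : List Int) (i : Int) : Int :=
  let module : Int := 1000000007
  ((PySem.List.pyRange 0 (values.length : Int) 1).foldl
      (fun (st : Int × Int) k =>
        let index := st.2 + 1
        let result :=
          (PySem.List.pyRange k (values.length : Int) 1).foldl
            (fun (result : Int) j =>
              let semiResult := PySem.Int.mod (PySem.List.pyGetD values j 0 * index ^ i.toNat) module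
              let occurrence := (values.length : Int) - j
              PySem.Int.mod (semiResult * occurrence + result) module)
            st.1
        (result, index))
      (0, 0)).1

-- ===== PORT B =====
def solve_alt (values : List Int) (i : Int) : Int :=
  let p : Int := 1000000007
  let n : Int := values.length
  ((PySem.List.enumerate values 0).foldl
      (fun (st : Int × Int) jv =>
        let pref := PySem.Int.mod (st.2 + PySem.Int.powMod (jv.1 + 1) i.toNat p) p
        let total := PySem.Int.mod (st.1 + jv.2 * (n - jv.1) * pref) p
        (total, pref))
      (0, 0)).1

-- ===== PRECONDITION & SPEC =====
-- Pre_ excludes negative exponents i, on which A's 'index ** i' makes A return a float, not an int.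
def Pre_solve (values : List Int) (i : Int) : Prop := 0 ≤ i
instance (values : List Int) (i : Int) : Decidable (Pre_solve values i) := by unfold Pre_solve; infer_instance
def pvWitness_solve : List Int × Int := ([1, 4, 2], 2)

def Spec_solve (values : List Int) (i : Int) (out : Int) : Prop := out = solve_alt values i
instance (values : List Int) (i : Int) (out : Int) : Decidable (Spec_solve values i out) := by unfold Spec_solve; infer_instance

-- ===== CLAIM (what is proved, stated in full; the proofs are below) =====
def Claim_equal_solve : Prop := ∀ (values : List Int) (i : Int), Dom_solve values i → Pre_solve values i → Spec_solve values i (solve values i)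

-- ===== LEMMAS AND PROOFS =====

-- sum of (k+1)^e over k < m
def powSum (e : Nat) : Nat → Int
  | 0 => 0
  | m + 1 => powSum e m + ((m : Int) + 1) ^ e

-- the term summed by A's inner loop for outer index k (modded, as A computes it)
def innerSum (vs : List Int) (e : Nat) (k : Nat) : Int :=
  ((PySem.List.pyRange (k : Int) (vs.length : Int) 1).map
     (fun j => PySem.List.pyGetD vs j 0 * ((k : Int) + 1) ^ e % 1000000007 * ((vs.length : Int) - j))).sum

-- A's accumulated (un-modded) total over the first m outer iterations
def asum (vs : List Int) (e : Nat) : Nat → Int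
  | 0 => 0
  | m + 1 => asum vs e m + innerSum vs e m

-- B's accumulated (un-modded) total over the suffix of values starting at position s
def bsum (e : Nat) (n : Int) : List Int → Nat → Int
  | [], _ => 0
  | v :: vs, s => v * (n - (s : Int)) * (powSum e (s + 1) % 1000000007) + bsum e n vs (s + 1)

-- strip an inner '% p' out of a sum / a product
theorem add_emod_right_cancel (a b : Int) : (a + b % 1000000007) % 1000000007 = (a + b) % 1000000007 := by
  conv_rhs => rw [Int.add_emod]
  rw [Int.add_emod, Int.emod_emod_of_dvd _ dvd_rfl]

theorem mul_emod_left_cancel (a b : Int) : a % 1000000007 * b % 1000000007 = a * b % 1000000007 := by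
  conv_rhs => rw [Int.mul_emod]
  rw [Int.mul_emod, Int.emod_emod_of_dvd _ dvd_rfl]

-- accumulation lemma: a loop 'r = (f j + r) % p' starting inside [0, p)
theorem fold_mod (L : List Int) (f : Int → Int) (r : Int) (h0 : 0 ≤ r) (h1 : r < 1000000007) :
    L.foldl (fun r j => (f j + r) % 1000000007) r = (r + (L.map f).sum) % 1000000007 := by
  induction L generalizing r with
  | nil => simp [Int.emod_eq_of_lt h0 h1]
  | cons a L ih =>
      simp only [List.foldl_cons, List.map_cons, List.sum_cons]
      rw [ih _ (Int.emod_nonneg _ (by norm_num)) (Int.emod_lt_of_pos _ (by norm_num)),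
        Int.emod_add_emod]
      ring_nf

-- A's outer loop invariant
theorem outer_fold (vs : List Int) (e : Nat) (m : Nat) :
    ((List.range m).foldl
        (fun (st : Int × Int) (k : Nat) =>
          ((PySem.List.pyRange (k : Int) (vs.length : Int) 1).foldl
              (fun (result : Int) j =>
                (PySem.List.pyGetD vs j 0 * (st.2 + 1) ^ e % 1000000007 * ((vs.length : Int) - j) + result) % 1000000007)
              st.1,
            st.2 + 1))
        (0, 0))
      = (asum vs e m % 1000000007, (m : Int)) := by
  induction m with
  | zero => simp [asum]
  | succ m ih =>
      rw [List.range_succ, List.foldl_append, ih]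
      simp only [List.foldl_cons, List.foldl_nil]
      rw [Prod.mk.injEq]
      constructor
      · rw [fold_mod _ _ _ (Int.emod_nonneg _ (by norm_num)) (Int.emod_lt_of_pos _ (by norm_num)),
          Int.emod_add_emod]
        rfl
      · push_cast; ring

-- B's loop invariant
theorem b_fold (vs : List Int) (e : Nat) (n : Int) (s : Nat) (t : Int)
    (h0 : 0 ≤ t) (h1 : t < 1000000007) :
    ((PySem.List.enumerate vs (s : Int)).foldl
        (fun (st : Int × Int) jv =>
          ((st.1 + jv.2 * (n - jv.1) * ((st.2 + (jv.1 + 1) ^ e % 1000000007) % 1000000007)) % 1000000007,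
            (st.2 + (jv.1 + 1) ^ e % 1000000007) % 1000000007))
        (t, powSum e s % 1000000007)).1
      = (t + bsum e n vs s) % 1000000007 := by
  induction vs generalizing s t with
  | nil => simp [bsum, Int.emod_eq_of_lt h0 h1]
  | cons v vs ih =>
      rw [PySem.List.enumerate_cons]
      simp only [List.foldl_cons]
      have hpre : (powSum e s % 1000000007 + ((s : Int) + 1) ^ e % 1000000007) % 1000000007
          = powSum e (s + 1) % 1000000007 := by
        rw [Int.emod_add_emod, add_emod_right_cancel]
        rfl
      rw [hpre]
      have hcast : ((s : Int) + 1) = ((s + 1 : Nat) : Int) := by push_cast; ring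
      rw [hcast]
      rw [ih (s + 1) _ (Int.emod_nonneg _ (by norm_num)) (Int.emod_lt_of_pos _ (by norm_num)),
        Int.emod_add_emod]
      simp only [bsum]
      ring_nf

-- list-range sum is a Finset.range sum
theorem sum_map_range (n : Nat) (f : Nat → Int) :
    ((List.range n).map f).sum = ∑ x ∈ Finset.range n, f x := rfl

theorem powSum_eq (e m : Nat) : powSum e m = ∑ k ∈ Finset.range m, ((k : Int) + 1) ^ e := by
  induction m with
  | zero => rfl
  | succ m ih => rw [Finset.sum_range_succ, ← ih]; rfl

-- congruence of a finite sum under '% p'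
theorem sum_emod_congr (t : Finset Nat) (f g : Nat → Int)
    (h : ∀ x ∈ t, f x % 1000000007 = g x % 1000000007) :
    (∑ x ∈ t, f x) % 1000000007 = (∑ x ∈ t, g x) % 1000000007 := by
  rw [Finset.sum_int_mod, Finset.sum_congr rfl h, ← Finset.sum_int_mod]

-- A's inner modded sum, mod p, equals the pure double-sum term
theorem innerSum_mod (vs : List Int) (e : Nat) (k : Nat) :
    innerSum vs e k % 1000000007
      = (∑ j ∈ Finset.Ico k vs.length, vs.getD j 0 * ((k : Int) + 1) ^ e * ((vs.length : Int) - (j : Int))) % 1000000007 := by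
  unfold innerSum
  rw [PySem.List.pyRange_one, List.map_map, sum_map_range]
  have hlen : (((vs.length : Int) - (k : Int)).toNat) = vs.length - k := by omega
  rw [hlen, Finset.sum_Ico_eq_sum_range]
  apply sum_emod_congr
  intro t ht
  simp only [Function.comp]
  have hk : ((k : Int) + (t : Int)) = ((k + t : Nat) : Int) := by push_cast; ring
  rw [hk, PySem.List.pyGetD_natCast, mul_emod_left_cancel]

-- A's accumulated total, mod p, equals the pure double sum
theorem asum_mod (vs : List Int) (e : Nat) (m : Nat) :
    asum vs e m % 1000000007
      = (∑ k ∈ Finset.range m, ∑ j ∈ Finset.Ico k vs.length,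
          vs.getD j 0 * ((k : Int) + 1) ^ e * ((vs.length : Int) - (j : Int))) % 1000000007 := by
  induction m with
  | zero => rfl
  | succ m ih =>
      show (asum vs e m + innerSum vs e m) % 1000000007 = _
      rw [Finset.sum_range_succ, Int.add_emod, ih, innerSum_mod, ← Int.add_emod]

-- the double-sum swap: sum over k then j ≥ k equals sum over j weighted by powSum
theorem swap_sum (vs : List Int) (e : Nat) :
    (∑ k ∈ Finset.range vs.length, ∑ j ∈ Finset.Ico k vs.length,
        vs.getD j 0 * ((k : Int) + 1) ^ e * ((vs.length : Int) - (j : Int)))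
      = ∑ j ∈ Finset.range vs.length,
          vs.getD j 0 * ((vs.length : Int) - (j : Int)) * powSum e (j + 1) := by
  rw [Finset.range_eq_Ico, Finset.sum_Ico_Ico_comm]
  apply Finset.sum_congr rfl
  intro j hj
  rw [← Finset.range_eq_Ico]
  rw [powSum_eq, Finset.mul_sum]
  apply Finset.sum_congr rfl
  intro k hk
  ring

-- B's accumulated total, mod p, equals the pure weighted sum (shifted by s)
theorem bsum_mod (e : Nat) (n : Int) (vs : List Int) (s : Nat) :
    bsum e n vs s % 1000000007
      = (∑ d ∈ Finset.range vs.length,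
          vs.getD d 0 * (n - ((s : Int) + (d : Int))) * powSum e (s + d + 1)) % 1000000007 := by
  induction vs generalizing s with
  | nil => rfl
  | cons v vs ih =>
      show (v * (n - (s : Int)) * (powSum e (s + 1) % 1000000007) + bsum e n vs (s + 1)) % 1000000007 = _
      rw [List.length_cons, Finset.sum_range_succ']
      have h1 : (v * (n - (s : Int)) * (powSum e (s + 1) % 1000000007)) % 1000000007
          = ((v :: vs).getD 0 0 * (n - ((s : Int) + ((0 : Nat) : Int))) * powSum e (s + 0 + 1)) % 1000000007 := by
        rw [mul_comm (v * (n - (s : Int))) _, mul_emod_left_cancel]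
        simp only [List.getD_cons_zero, Nat.cast_zero, add_zero]
        ring_nf
      have h2 : (∑ d ∈ Finset.range vs.length,
            (v :: vs).getD (d + 1) 0 * (n - ((s : Int) + ((d + 1 : Nat) : Int))) * powSum e (s + (d + 1) + 1))
          = ∑ d ∈ Finset.range vs.length,
            vs.getD d 0 * (n - (((s + 1 : Nat) : Int) + (d : Int))) * powSum e ((s + 1) + d + 1) := by
        apply Finset.sum_congr rfl
        intro d hd
        simp only [List.getD_cons_succ]
        have hc : (n - ((s : Int) + ((d + 1 : Nat) : Int))) = (n - (((s + 1 : Nat) : Int) + (d : Int))) := by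
          push_cast; ring
        have hi : s + (d + 1) + 1 = (s + 1) + d + 1 := by omega
        rw [hc, hi]
      rw [Int.add_emod, ih (s + 1), ← Int.add_emod]
      rw [Int.add_emod, h2, Int.add_emod (∑ d ∈ Finset.range vs.length,
            vs.getD d 0 * (n - (((s + 1 : Nat) : Int) + (d : Int))) * powSum e ((s + 1) + d + 1))]
      rw [h1, Int.add_comm]

-- the two ports, unfolded to the invariants
theorem solveA_eq (vs : List Int) (i : Int) :
    solve vs i = asum vs i.toNat vs.length % 1000000007 := by
  have hmod : ∀ a : Int, PySem.Int.mod a 1000000007 = a % 1000000007 :=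
    fun a => PySem.Int.mod_eq_emod_of_pos (by norm_num)
  simp only [solve, hmod]
  rw [PySem.List.pyRange_zero_natCast, List.foldl_map]
  rw [outer_fold vs i.toNat vs.length]

theorem solveB_eq (vs : List Int) (i : Int) :
    solve_alt vs i = bsum i.toNat (vs.length : Int) vs 0 % 1000000007 := by
  have hmod : ∀ a : Int, PySem.Int.mod a 1000000007 = a % 1000000007 :=
    fun a => PySem.Int.mod_eq_emod_of_pos (by norm_num)
  simp only [solve_alt, PySem.Int.powMod, hmod]
  have h0 : (0 : Int) = ((0 : Nat) : Int) := rfl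
  have := b_fold vs i.toNat (vs.length : Int) 0 0 (by norm_num) (by norm_num)
  simp only [Nat.cast_zero, powSum, Int.zero_emod] at this
  rw [this]
  norm_num

-- ===== VERDICT (by name: the statement is the Claim_ definition above) =====
theorem solve_spec : Claim_equal_solve := by
  intro values i _ _
  unfold Spec_solve
  rw [solveA_eq, solveB_eq, asum_mod, swap_sum, bsum_mod]
  congr 1
  apply Finset.sum_congr rfl
  intro j hj
  norm_num
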